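-- pv_equiv track=rewrite | github.com/olkry/block_04_contest | imputy.py | list_superset
-- ===== SOURCE A (Python) =====
-- def list_superset(list_set_1, list_set_2):
--     # Не меняйте названия функции и параметров. Напишите решение здесь.
--     count_in_ls1 = 0
--     count_in_ls2 = 0
--     len_ls_1 = len(list_set_1)
--     len_ls_2 = len(list_set_2)
--     for ch1 in list_set_1:
--         if ch1 in list_set_2:
--             count_in_ls2 += 1
--     for ch2 in list_set_2:
--         if ch2 in list_set_1:
--             count_in_ls1 += 1
--     if len_ls_1 == count_in_ls2 and len_ls_2 == count_in_ls1:
--         return 'Наборы равны.'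
--     if len_ls_1 == count_in_ls2 and len_ls_2 != count_in_ls1:
--         return f'Набор {list_set_2} - супермножество.'
--     if len_ls_1 != count_in_ls2 and len_ls_2 == count_in_ls1:
--         return f'Набор {list_set_1} - супермножество.'
--     else:
--         return 'Супермножество не обнаружено.'
-- ===== SOURCE B (Python) =====
-- def list_superset(list_set_1, list_set_2):
--     s1 = sorted(set(list_set_1))
--     s2 = sorted(set(list_set_2))
--     a = _contains_all(s1, s2)
--     b = _contains_all(s2, s1)
--     if a and b:
--         return 'Наборы равны.'
--     if a:
--         return f'Набор {list_set_2} - супермножество.'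
--     if b:
--         return f'Набор {list_set_1} - супермножество.'
--     return 'Супермножество не обнаружено.'
--
--
-- def _contains_all(xs, ys):
--     # merge scan over two strictly increasing lists: is every xs element in ys?
--     i, j = 0, 0
--     while i < len(xs):
--         if j == len(ys):
--             return False
--         if ys[j] < xs[i]:
--             j += 1
--         elif ys[j] == xs[i]:
--             i += 1
--         else:
--             return False
--     return True
-- ===== Notes on version B (the rewrite author's own statement) =====
-- stated objective: faster
-- what changed: Replaces A's quadratic membership-counting loops with sort-deduplicate plus a two-pointer merge scan that decides each subset relation in one linear pass over the sorted lists.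
import Mathlib
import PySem

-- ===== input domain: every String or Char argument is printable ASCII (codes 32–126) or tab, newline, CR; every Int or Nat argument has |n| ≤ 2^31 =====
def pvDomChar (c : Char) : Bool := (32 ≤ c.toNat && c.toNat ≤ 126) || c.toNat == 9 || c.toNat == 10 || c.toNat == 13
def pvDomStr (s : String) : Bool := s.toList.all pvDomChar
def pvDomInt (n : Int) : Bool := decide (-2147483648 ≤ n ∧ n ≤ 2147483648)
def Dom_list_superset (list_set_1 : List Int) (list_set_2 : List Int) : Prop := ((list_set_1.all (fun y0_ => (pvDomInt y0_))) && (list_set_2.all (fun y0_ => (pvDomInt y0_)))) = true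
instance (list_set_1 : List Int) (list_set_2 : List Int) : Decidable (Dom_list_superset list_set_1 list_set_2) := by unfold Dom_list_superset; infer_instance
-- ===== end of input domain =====

-- B replaces A's quadratic membership-counting loops by sort-deduplicate plus a two-pointer merge scan (faster).

-- shared formatting helper: Python's f'{xs}' for a list of ints, e.g. "[1, 2]"
def pyListRepr (xs : List Int) : String :=
  String.ofList ('[' :: (List.intercalate [',', ' '] (xs.map PySem.Int.toChars)) ++ [']'])

-- ===== PORT A =====
def list_superset (list_set_1 : List Int) (list_set_2 : List Int) : String :=
  let count_in_ls2 : Int :=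
    list_set_1.foldl (fun c ch1 => if ch1 ∈ list_set_2 then c + 1 else c) 0
  let count_in_ls1 : Int :=
    list_set_2.foldl (fun c ch2 => if ch2 ∈ list_set_1 then c + 1 else c) 0
  let len_ls_1 : Int := list_set_1.length
  let len_ls_2 : Int := list_set_2.length
  if len_ls_1 = count_in_ls2 ∧ len_ls_2 = count_in_ls1 then
    "Наборы равны."
  else if len_ls_1 = count_in_ls2 ∧ len_ls_2 ≠ count_in_ls1 then
    "Набор " ++ pyListRepr list_set_2 ++ " - супермножество."
  else if len_ls_1 ≠ count_in_ls2 ∧ len_ls_2 = count_in_ls1 then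
    "Набор " ++ pyListRepr list_set_1 ++ " - супермножество."
  else
    "Супермножество не обнаружено."

-- ===== PORT B =====
-- merge scan over two strictly increasing lists: does ys contain every element of xs?
def containsAll : List Int → List Int → Bool
  | [], _ => true
  | _ :: _, [] => false
  | x :: xs, y :: ys =>
    if y < x then containsAll (x :: xs) ys
    else if y = x then containsAll xs (y :: ys)
    else false
termination_by xs ys => (xs.length, ys.length)

def list_superset_alt (list_set_1 : List Int) (list_set_2 : List Int) : String :=
  let s1 := PySem.List.sorted (PySem.Set.ofList list_set_1) (fun x => x) false
  let s2 := PySem.List.sorted (PySem.Set.ofList list_set_2) (fun x => x) false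
  let a := containsAll s1 s2
  let b := containsAll s2 s1
  if a && b then
    "Наборы равны."
  else if a then
    "Набор " ++ pyListRepr list_set_2 ++ " - супермножество."
  else if b then
    "Набор " ++ pyListRepr list_set_1 ++ " - супермножество."
  else
    "Супермножество не обнаружено."

-- ===== PRECONDITION & SPEC =====
def Spec_list_superset (list_set_1 : List Int) (list_set_2 : List Int) (out : String) : Prop := out = list_superset_alt list_set_1 list_set_2
instance (list_set_1 : List Int) (list_set_2 : List Int) (out : String) : Decidable (Spec_list_superset list_set_1 list_set_2 out) := by unfold Spec_list_superset; infer_instance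

-- ===== CLAIM (what is proved, stated in full; the proofs are below) =====
def Claim_equal_list_superset : Prop := ∀ (list_set_1 : List Int) (list_set_2 : List Int), Dom_list_superset list_set_1 list_set_2 → Spec_list_superset list_set_1 list_set_2 (list_superset list_set_1 list_set_2)

-- ===== LEMMAS AND PROOFS =====

-- A's counting loop over l counts (with multiplicity) the elements of l lying in m
theorem count_loop_eq_countP (l m : List Int) (c : Int) :
    l.foldl (fun c ch => if ch ∈ m then c + 1 else c) c = c + (l.countP (fun ch => decide (ch ∈ m)) : Int) := by
  induction l generalizing c with
  | nil => simp
  | cons x xs ih =>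
    simp only [List.foldl_cons, List.countP_cons, ih]
    by_cases h : x ∈ m
    · simp [h]; omega
    · simp [h]

-- "length = count of members" says exactly "every element is a member"
theorem len_eq_count_iff (l m : List Int) :
    ((l.length : Int) = l.foldl (fun c ch => if ch ∈ m then c + 1 else c) (0 : Int)) ↔ ∀ x ∈ l, x ∈ m := by
  rw [count_loop_eq_countP, zero_add, Int.natCast_inj, eq_comm, List.countP_eq_length]
  simp

-- the merge scan on strictly increasing lists decides the subset relation
theorem containsAll_iff (xs ys : List Int) (hx : xs.Pairwise (· < ·)) (hy : ys.Pairwise (· < ·)) :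
    containsAll xs ys = true ↔ ∀ a ∈ xs, a ∈ ys := by
  fun_induction containsAll xs ys with
  | case1 ys => simp
  | case2 x xs => simp; exact ⟨x, fun h => absurd rfl h⟩
  | case3 x xs y ys hlt ih =>
    rw [ih hx (List.Pairwise.of_cons hy)]
    constructor
    · intro h a ha; exact List.mem_cons_of_mem _ (h a ha)
    · intro h a ha
      rcases List.mem_cons.mp (h a ha) with h' | h'
      · exfalso
        rcases List.mem_cons.mp ha with h'' | h''
        · omega
        · have := (List.pairwise_cons.mp hx).1 a h''; omega
      · exact h'
  | case4 x xs ys hnlt ih =>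
    rw [ih (List.Pairwise.of_cons hx) hy]
    constructor
    · intro h a ha
      rcases List.mem_cons.mp ha with h' | h'
      · subst h'; exact List.mem_cons_self ..
      · exact h a h'
    · intro h a ha; exact h a (List.mem_cons_of_mem _ ha)
  | case5 x xs y ys hnlt hne =>
    simp only [Bool.false_eq_true, false_iff]
    intro h
    have hxm := h x (List.mem_cons_self ..)
    rcases List.mem_cons.mp hxm with h' | h'
    · exact hne h'.symm
    · have := (List.pairwise_cons.mp hy).1 x h'; omega

-- B's subset flag equals "every element of l is in m"
theorem flag_iff (l m : List Int) :
    containsAll (PySem.List.sorted (PySem.Set.ofList l) (fun x => x) false)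
      (PySem.List.sorted (PySem.Set.ofList m) (fun x => x) false) = true ↔ ∀ x ∈ l, x ∈ m := by
  rw [containsAll_iff _ _ (by simpa using PySem.List.sorted_ofList_pairwise_lt (xs := l))
      (by simpa using PySem.List.sorted_ofList_pairwise_lt (xs := m))]
  constructor
  · intro h x hx
    have := h x (by simp [PySem.List.mem_sorted, PySem.Set.mem_ofList, hx])
    simpa [PySem.List.mem_sorted, PySem.Set.mem_ofList] using this
  · intro h x hx
    simp only [PySem.List.mem_sorted, PySem.Set.mem_ofList] at hx ⊢
    exact h x hx

-- ===== VERDICT (by name: the statement is the Claim_ definition above) =====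
theorem list_superset_spec : Claim_equal_list_superset := by
  intro l1 l2 _
  show list_superset l1 l2 = list_superset_alt l1 l2
  unfold list_superset list_superset_alt
  simp only [len_eq_count_iff, Bool.and_eq_true, flag_iff, ne_eq]
  split_ifs <;> first | rfl | tauto
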